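/-
  THE SEGMENTS OF `DGifBufferedInput` (dgif_lib.c:1118-1148, static; 84 instructions; NO protected frame: it has no
  address-taken local): the assertions at its cut points, the segment claims, and the COMPOSITION (segments ⇒
  `DGifBufferedInput.spec`), proved here. The shape of the assertions is `DGifGetWord.Body`'s (Gif/Spec/ReaderSegs.lean) without a
  frame of its own: the active frames stay `frames`, and no shadow byte is ever written.

      unit                      addresses                                  instructions   calls
      DGifBufferedInput.1       106540H … 10659DH                          29             the checks load1 (three sites), store1
      DGifBufferedInput.2       1065A8H … 1065FEH                          22             InternalRead; the checks load1, store4 (two sites)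
      DGifBufferedInput.3       1065FEH … 106666H                          26             InternalRead; the checks load1 (two sites), store1, store4
      DGifBufferedInput.E       10659DH … 1065A8H                           7             —

  THE FRAME: five pushes (`r14 r13 r12 rbp rbx`): `rsp = RA − 40` (`RA` = the entry's `rsp`). The registers of the body: `r13 = gif`,
  `rbx = Buf` (`= pv + 88`, by the pre), `r12 = NextByte`; `rbp` is a scratch register and then THE RESULT (the epilogue does
  `mov eax, ebp`); `r14d` = the result of the second read (segment 3 only); `r15` is never touched.

  EVERY ACCESS TO `Buf` IS INSIDE `pv.Buf[256]` BY TYPE: `Buf[0]`, `Buf[1]`, `Buf[Buf[1]]` (a byte index: at most 255), the buffers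
  `[Buf, Buf + 1)` and `[Buf + 1, Buf + 1 + Buf[0])` (`1 + 255 ≤ 256`): `bufLive`.

  `*NextByte` IS NOT A BYTE OF `pv.Buf`: the post `rem′ + Buf[0]′ + 1 ≤ rem + Buf[0]` would be false for a `NextByte` inside
  `pv.Buf` (`BufOK.loose` alone admits it: the `pv` case of `Loose`). The precondition's `OutPtr.low` (`NextByte + 1 ≤ 800000H`: a
  STACK address, it meets no heap object) excludes it: every assertion carries `pre`, and segments 1 and 3 (the stores
  `*NextByte = …` at 10658CH, 106651H, before `Buf[0] −= 1`) take the fact from there.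
-/
import Gif.Spec.Reader
import Gif.LabelsAt
namespace Gif.Spec
open X86 X86.User Asan ProgX.Base ProgX.Base.Spec

namespace DGifBufferedInput

/-- **INSIDE `DGifBufferedInput`**, at the address `cut`, inside the call that was entered at the state `e` (return address `ret`)
with the function's precondition: what holds at EVERY cut, the join before the epilogue included (where the three argument
registers are dead: `r13` was overwritten at 106644H). The five pushes are done. -/
structure Frame (cut : Word) (H : Heap) (rest : List Obj) (frames : List (Nat × FrameLayout)) (F : Forest) (R : Rd) (u₀ e : State)
    (ret : Word) (v : State) : Prop where
  /-- the function was entered at `e` … -/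
  entry : AtEntry (conv u₀) Gif.L.DGifBufferedInput.entry (DGifBufferedInput.spec H rest frames F R).frame ret e
  /-- … with its precondition -/
  pre : (DGifBufferedInput.spec H rest frames F R).pre e
  /-- `*NextByte` (a byte of a live object at or above 700000H) lies above the return-address slot: the store through
  `NextByte` meets neither the function's own stack nor the return address. (A consequence of `entry` and `pre`, stated once.) -/
  next_above : (e.reg .rsp).toNat + 8 ≤ (e.reg .rdx).toNat
  rip : v.rip = cut
  /-- five pushes -/
  rsp : v.reg .rsp = e.reg .rsp - 40
  /-- never touched -/
  r15 : v.reg .r15 = e.reg .r15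
  /-- the saved registers, in push order (`r14 r13 r12 rbp rbx`): the pops 10659FH … 1065A5H restore them -/
  slot_r14 : v.mem.readLE (e.reg .rsp - 8) 8 = (e.reg .r14).toNat
  slot_r13 : v.mem.readLE (e.reg .rsp - 16) 8 = (e.reg .r13).toNat
  slot_r12 : v.mem.readLE (e.reg .rsp - 24) 8 = (e.reg .r12).toNat
  slot_rbp : v.mem.readLE (e.reg .rsp - 32) 8 = (e.reg .rbp).toNat
  slot_rbx : v.mem.readLE (e.reg .rsp - 40) 8 = (e.reg .rbx).toNat
  /-- the return-address slot `[RA, RA + 8)` still holds `ret` (no store of the function or of a callee goes there): the `ret`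
  at 1065A7H pops it -/
  slot_ra : UInt64.ofNat (v.mem.readLE (e.reg .rsp) 8) = ret
  /-- the heap's invariant: the SAME frames (no protected frame of its own); the clean stack ends at the body's `rsp` -/
  inv : HeapInv H rest frames ((e.reg .rsp).toNat - 40) v.mem
  /-- the state invariant -/
  ok : GifOK H F R v.mem
  /-- the reader did not go back -/
  rem : rem R v.mem ≤ rem R e.mem
  /-- nothing was written but the function's stack (its callees' included) and the contract's windows: no shadow byte -/
  same : Mem.SameExcept
    [⟨(e.reg .rsp).toNat - 224, (e.reg .rsp).toNat⟩,
     ⟨F.pv + 88, F.pv + 344⟩,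
     ⟨(e.reg .rdx).toNat, (e.reg .rdx).toNat + 1⟩,
     ⟨F.gif + 96, F.gif + 100⟩,
     ⟨R.cur, R.cur + 8⟩] e.mem v.mem
  code : (conv u₀).code.In v.mem
  abi : (conv u₀).inv v

/-- **IN THE BODY of `DGifBufferedInput`**: `Frame`, and the three arguments in their callee-saved registers. -/
structure Body (cut : Word) (H : Heap) (rest : List Obj) (frames : List (Nat × FrameLayout)) (F : Forest) (R : Rd) (u₀ e : State)
    (ret : Word) (v : State) : Prop where
  frame : Frame cut H rest frames F R u₀ e ret v
  /-- `mov r13, rdi`: gif -/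
  r13 : v.reg .r13 = e.reg .rdi
  /-- `mov rbx, rsi`: Buf (`pv + 88`) -/
  rbx : v.reg .rbx = e.reg .rsi
  /-- `mov r12, rdx`: NextByte -/
  r12 : v.reg .r12 = e.reg .rdx

/-- **THE BUFFER IS EMPTY** (at 1065A8H, `mov edx, 1`, l.1123: the target of the `je` of l.1120): `Body`, and no byte has been
read yet (the measure of the post is counted from here). -/
structure Refill (H : Heap) (rest : List Obj) (frames : List (Nat × FrameLayout)) (F : Forest) (R : Rd) (u₀ e : State)
    (ret : Word) (v : State) : Prop where
  body : Body Gif.L.DGifBufferedInput.at_1065a8 H rest frames F R u₀ e ret v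
  /-- the reader is where it was at the entry -/
  rem_eq : rem R v.mem = rem R e.mem

/-- **AFTER THE LENGTH BYTE** (at 1065FEH, `movzx edx, dl`, l.1135: the target of the `jne` of l.1131): `InternalRead(gif, Buf, 1)`
returned 1 and stored the length `Buf[0]`, which is not 0 and which `rdx` holds (zero-extended: `movzx edx, BYTE PTR [rbx]`); the
reader advanced by exactly one byte. -/
structure AfterLen (H : Heap) (rest : List Obj) (frames : List (Nat × FrameLayout)) (F : Forest) (R : Rd) (u₀ e : State)
    (ret : Word) (v : State) : Prop where
  body : Body Gif.L.DGifBufferedInput.at_1065fe H rest frames F R u₀ e ret v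
  /-- `rdx = Buf[0]` -/
  rdx : (v.reg .rdx).toNat = rd v.mem (F.pv + 88) 1
  /-- `1 ≤ Buf[0] ≤ 255`: the request of the second read -/
  len_pos : 1 ≤ rd v.mem (F.pv + 88) 1
  len_le : rd v.mem (F.pv + 88) 1 ≤ 255
  /-- `mov ebp, eax` at 1065B8H with `rax = 1`: THE RESULT of the GIF_OK path of segment 3, which does not set it again -/
  rbp : (v.reg .rbp).toNat = 1
  /-- `ReadPost` with `k = n = 1` -/
  rem_eq : rem R v.mem + 1 = rem R e.mem

/-- **BEFORE THE EPILOGUE** (at 10659DH, `mov eax, ebp`, l.1148: the join of all paths): `Frame` (the argument registers are dead), THE RESULT IN `rbp` (zero-extended: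
`mov ebp, 1`, `mov ebp, eax` with `rax = 1`, or `mov ebp, 0`), and the contract's postcondition stated of the present memory (the
epilogue pops and returns: it writes nothing). -/
structure Done (H : Heap) (rest : List Obj) (frames : List (Nat × FrameLayout)) (F : Forest) (R : Rd) (u₀ e : State)
    (ret : Word) (v : State) : Prop where
  frame : Frame Gif.L.DGifBufferedInput.at_10659d H rest frames F R u₀ e ret v
  /-- GIF_OK (1) or GIF_ERROR (0), in `rbp` -/
  res : (v.reg .rbp).toNat = 1 ∨ (v.reg .rbp).toNat = 0
  /-- GIF_OK: a byte moved from the input, or from the buffer, to the caller -/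
  ok1 : (v.reg .rbp).toNat = 1 →
    rem R v.mem + rd v.mem (F.pv + 88) 1 + 1 ≤ rem R e.mem + rd e.mem (F.pv + 88) 1

/-- **Segment 1** (106540H … 10659DH, 29 instructions; l.1119-1120, l.1143-1147): five pushes, the three argument moves; the
checked load of `Buf[0]`; 0: `Refill` (nothing was written but the pushes); else the checked load of `Buf[1]`, the store
`Buf[1] = Buf[1] + 1` (a byte), the checked load of `Buf[old Buf[1]]` (a byte index: inside `pv.Buf`), the checked store of
`*NextByte`, `Buf[0] = Buf[0] − 1` (`*NextByte` is not `Buf[0]`: `OutPtr.low` of the pre, see the header), `ebp = 1`: `Done`. -/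
def Seg1 (Lay : Layout) (μ : Microarch) (u₀ : State) : Prop :=
  ∀ (H : Heap) (rest : List Obj) (frames : List (Nat × FrameLayout)) (F : Forest) (R : Rd) (e : State) (ret : Word),
    AtEntry (conv u₀) Gif.L.DGifBufferedInput.entry (DGifBufferedInput.spec H rest frames F R).frame ret e →
    (DGifBufferedInput.spec H rest frames F R).pre e →
    ReachVia Lay μ WayInv e (fun w => Done H rest frames F R u₀ e ret w ∨ Refill H rest frames F R u₀ e ret w)

/-- **Segment 2** (1065A8H … 1065FEH, 22 instructions; l.1123-1134): `InternalRead(gif, Buf, 1)` (`BufOK`: `bufLive` with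
`0 + 1 ≤ 256`, the `pv` case of `Loose`, `HeapWin.live`); not 1: l.1124, the checked store of `gif.Error`, `ebp = 0`: `Done`; 1: the
checked load of `Buf[0]`; 0: l.1132, the checked store of `gif.Error`, `ebp = 0`: `Done`; else `AfterLen` (with `rbp = 1` from
`mov ebp, eax` at 1065B8H). -/
def Seg2 (Lay : Layout) (μ : Microarch) (u₀ : State) : Prop :=
  ∀ (H : Heap) (rest : List Obj) (frames : List (Nat × FrameLayout)) (F : Forest) (R : Rd) (e : State) (ret : Word) (v : State),
    Refill H rest frames F R u₀ e ret v →
    ReachVia Lay μ WayInv v (fun w => Done H rest frames F R u₀ e ret w ∨ AfterLen H rest frames F R u₀ e ret w)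

/-- **Segment 3** (1065FEH … 106666H, 26 instructions; l.1135-1141): `InternalRead(gif, Buf + 1, Buf[0])` (`BufOK`: `bufLive` with
`1 + Buf[0] ≤ 256`, the `pv` case of `Loose`, `HeapWin.live`), `r14d` = its result, compared with `Buf[0]` re-read (checked;
unchanged by the read into `Buf[1 …]`); different: l.1136, the checked store of `gif.Error`, `ebp = 0`; equal (`k = n`: the reader
advanced by `1 + n` in all): the checked load of `Buf[1]` (into `r13d`: gif is dead from here), the checked store of `*NextByte`,
`Buf[1] = 2`, `Buf[0] = Buf[0] − 1` (`*NextByte` is neither: `OutPtr.low` of the pre, see the header); `ebp` is still 1 (`AfterLen.rbp`).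
All paths to `Done`. -/
def Seg3 (Lay : Layout) (μ : Microarch) (u₀ : State) : Prop :=
  ∀ (H : Heap) (rest : List Obj) (frames : List (Nat × FrameLayout)) (F : Forest) (R : Rd) (e : State) (ret : Word) (v : State),
    AfterLen H rest frames F R u₀ e ret v →
    ReachVia Lay μ WayInv v (Done H rest frames F R u₀ e ret)

/-- **Segment E** (the epilogue, 10659DH … 1065A8H, 7 instructions): `mov eax, ebp`, five pops, `ret`. -/
def SegE (Lay : Layout) (μ : Microarch) (u₀ : State) : Prop :=
  ∀ (H : Heap) (rest : List Obj) (frames : List (Nat × FrameLayout)) (F : Forest) (R : Rd) (e : State) (ret : Word) (v : State),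
    Done H rest frames F R u₀ e ret v →
    ReachVia Lay μ WayInv v (Returned (conv u₀) (DGifBufferedInput.spec H rest frames F R) e ret)

/-- **The composition of `DGifBufferedInput`**: 1 ends before the epilogue (the buffer had a byte) or at `Refill`; 2 ends before
the epilogue (an error) or at `AfterLen`; 3 ends before the epilogue; then E. -/
theorem compose {Lay : Layout} {μ : Microarch} {u₀ : State} (h1 : Seg1 Lay μ u₀) (h2 : Seg2 Lay μ u₀) (h3 : Seg3 Lay μ u₀)
    (hE : SegE Lay μ u₀) :
    ∀ (H : Heap) (rest : List Obj) (frames : List (Nat × FrameLayout)) (F : Forest) (R : Rd),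
      Calls Lay μ WayInv (conv u₀) Gif.L.DGifBufferedInput.entry (DGifBufferedInput.spec H rest frames F R) := by
  intro H rest frames F R e ret he hp
  refine (h1 H rest frames F R e ret he hp).trans ?_
  intro v hv
  rcases hv with hdone | hrefill
  · exact hE H rest frames F R e ret v hdone
  · refine (h2 H rest frames F R e ret v hrefill).trans ?_
    intro w hw
    rcases hw with hdone | hlen
    · exact hE H rest frames F R e ret w hdone
    · refine (h3 H rest frames F R e ret w hlen).trans ?_
      intro x hx
      exact hE H rest frames F R e ret x hx

end DGifBufferedInput

end Gif.Spec
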